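-- pv_equiv track=rewrite | github.com/noelz8/trabajos-intro | pares e impares.py | listas_aux
-- ===== SOURCE A (Python) =====
-- def listas_aux(num):
--     listaPares=[]
--     listaImpares=[]
--     while num>0:
--         digi=num%10
--         if (digi%2==0):
--             listaPares +=[digi]
--         else: listaImpares+=[digi]
--         num=num//10
--     return listaPares,listaImpares
-- ===== SOURCE B (Python) =====
-- def listas_aux(num):
--     if num <= 0:
--         return ([], [])
--     pares, impares = [], []
--     for ch in reversed(str(num)):
--         d = int(ch)
--         (pares if d % 2 == 0 else impares).append(d)
--     return pares, impares
-- ===== Notes on version B (the rewrite author's own statement) =====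
-- stated objective: idiomatic
-- what changed: Replaces the %/// digit-extraction loop with iteration over the reversed decimal string representation, converting each character and dispatching it to the even or odd list.
import Mathlib
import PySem

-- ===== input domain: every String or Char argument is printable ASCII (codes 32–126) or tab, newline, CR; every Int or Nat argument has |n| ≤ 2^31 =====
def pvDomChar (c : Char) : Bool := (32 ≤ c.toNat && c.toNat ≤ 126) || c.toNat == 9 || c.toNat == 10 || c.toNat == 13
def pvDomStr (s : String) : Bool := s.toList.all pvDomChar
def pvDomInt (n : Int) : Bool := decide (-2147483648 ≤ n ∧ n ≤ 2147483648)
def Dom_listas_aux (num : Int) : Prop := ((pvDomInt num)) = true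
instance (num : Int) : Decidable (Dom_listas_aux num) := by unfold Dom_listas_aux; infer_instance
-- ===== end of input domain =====

-- B iterates over the reversed decimal string instead of A's %/// extraction loop; same return value.

-- ===== PORT A =====
-- the while loop of A, with its two accumulator lists
def listas_auxGo (num : Int) (listaPares listaImpares : List Int) : List Int × List Int :=
  if num > 0 then
    let digi := PySem.Int.mod num 10
    if PySem.Int.mod digi 2 = 0 then
      listas_auxGo (PySem.Int.floordiv num 10) (listaPares ++ [digi]) listaImpares
    else
      listas_auxGo (PySem.Int.floordiv num 10) listaPares (listaImpares ++ [digi])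
  else (listaPares, listaImpares)
termination_by num.toNat
decreasing_by
  all_goals
    rw [PySem.Int.floordiv_eq_ediv_of_pos (by omega)]
    omega

def listas_aux (num : Int) : List Int × List Int :=
  listas_auxGo num [] []

-- ===== PORT B =====
-- int(ch) for a single decimal-digit character; exact on '0'..'9'
def pyDigitVal (ch : Char) : Int := (ch.toNat : Int) - 48

def listas_aux_alt (num : Int) : List Int × List Int :=
  if num ≤ 0 then ([], [])
  else
    (PySem.Int.toChars num).reverse.foldl
      (fun acc ch =>
        let d := pyDigitVal ch
        if PySem.Int.mod d 2 = 0 then (acc.1 ++ [d], acc.2) else (acc.1, acc.2 ++ [d]))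
      ([], [])

-- ===== PRECONDITION & SPEC =====
def Spec_listas_aux (num : Int) (out : List Int × List Int) : Prop := out = listas_aux_alt num
instance (num : Int) (out : List Int × List Int) : Decidable (Spec_listas_aux num out) := by unfold Spec_listas_aux; infer_instance

-- ===== CLAIM (what is proved, stated in full; the proofs are below) =====
def Claim_equal_listas_aux : Prop := ∀ (num : Int), Dom_listas_aux num → Spec_listas_aux num (listas_aux num)

-- ===== LEMMAS AND PROOFS =====

-- common shape: one digit-dispatch step on a Nat digit
def digStep (acc : List Int × List Int) (d : Nat) : List Int × List Int :=
  if d % 2 = 0 then (acc.1 ++ [(d : Int)], acc.2) else (acc.1, acc.2 ++ [(d : Int)])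

lemma toDigitsCore_digits (f : Nat) : ∀ (n : Nat) (l : List Char), n < f → 0 < n →
    Nat.toDigitsCore 10 f n l = ((Nat.digits 10 n).map Nat.digitChar).reverse ++ l := by
  induction f with
  | zero => intro n l h; omega
  | succ f ih =>
    intro n l h hn
    rw [Nat.toDigitsCore]
    by_cases h0 : n / 10 = 0
    · simp only [h0, if_true]
      rw [Nat.digits_def' (by norm_num) hn, h0]
      simp
    · simp only [h0, if_false]
      rw [ih (n / 10) _ (by omega) (by omega)]
      rw [Nat.digits_def' (by norm_num) hn]
      simp

lemma toDigits_reverse (n : Nat) (hn : 0 < n) :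
    (Nat.toDigits 10 n).reverse = (Nat.digits 10 n).map Nat.digitChar := by
  rw [Nat.toDigits, toDigitsCore_digits (n + 1) n [] (by omega) hn]
  simp

lemma digitVal_digitChar (d : Nat) (h : d < 10) :
    pyDigitVal (Nat.digitChar d) = (d : Int) := by
  interval_cases d <;> decide

lemma go_eq_foldl (n : Nat) : ∀ (p i : List Int),
    listas_auxGo (n : Int) p i = (Nat.digits 10 n).foldl digStep (p, i) := by
  induction n using Nat.strong_induction_on with
  | _ n ih =>
    intro p i
    rcases Nat.eq_zero_or_pos n with h0 | h0
    · subst h0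
      rw [listas_auxGo]
      simp
    · rw [listas_auxGo]
      have hpos : (n : Int) > 0 := by exact_mod_cast h0
      rw [if_pos hpos]
      have hmod : PySem.Int.mod (n : Int) 10 = ((n % 10 : Nat) : Int) :=
        PySem.Int.mod_natCast n 10
      have hmod2 : PySem.Int.mod ((n % 10 : Nat) : Int) 2 = ((n % 10 % 2 : Nat) : Int) :=
        PySem.Int.mod_natCast (n % 10) 2
      have hdiv : PySem.Int.floordiv (n : Int) 10 = ((n / 10 : Nat) : Int) :=
        PySem.Int.floordiv_natCast n 10
      rw [Nat.digits_def' (by norm_num) h0]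
      simp only [hmod, hmod2, hdiv, List.foldl_cons]
      by_cases he : n % 10 % 2 = 0
      · rw [if_pos (by exact_mod_cast congrArg (Nat.cast : Nat → Int) he),
          ih (n / 10) (Nat.div_lt_self h0 (by norm_num))]
        have h2 : n % 2 = 0 := by omega
        simp [digStep, h2]
      · rw [if_neg (by exact_mod_cast fun h => he (by exact_mod_cast h)),
          ih (n / 10) (Nat.div_lt_self h0 (by norm_num))]
        have h2 : ¬ n % 2 = 0 := by omega
        simp [digStep, h2]

lemma alt_eq_foldl (n : Nat) (hn : 0 < n) :
    listas_aux_alt (n : Int) = (Nat.digits 10 n).foldl digStep ([], []) := by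
  rw [listas_aux_alt, if_neg (by omega : ¬ ((n : Int) ≤ 0))]
  rw [PySem.Int.toChars, if_neg (by omega : ¬ ((n : Int) < 0))]
  rw [Int.toNat_natCast n, toDigits_reverse n hn, List.foldl_map]
  apply PySem.List.foldl_congr_mem
  intro acc d hd
  have hlt : d < 10 := Nat.digits_lt_base (by norm_num) hd
  by_cases he : d % 2 = 0
  · simp [digitVal_digitChar d hlt, digStep, he]
    omega
  · simp [digitVal_digitChar d hlt, digStep, he]
    omega

-- ===== VERDICT (by name: the statement is the Claim_ definition above) =====
theorem listas_aux_spec : Claim_equal_listas_aux := by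
  intro num _
  unfold Spec_listas_aux listas_aux
  rcases le_or_gt num 0 with hle | hgt
  · rw [listas_auxGo, if_neg (by omega : ¬ num > 0), listas_aux_alt, if_pos hle]
  · have hn : num = ((num.toNat : Nat) : Int) := (Int.toNat_of_nonneg (by omega)).symm
    rw [hn, go_eq_foldl num.toNat [] [],
      alt_eq_foldl num.toNat (by omega)]
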